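-- pv_equiv track=rewrite | github.com/encukou/mufl | mufl/burrow.py | encode_letter
-- ===== SOURCE A (Python) =====
-- def encode_letter(letter):
--     enc = []
--     for x in range(4):
--         num = 0
--         for y in range(5):
--             num <<= 1
--             if (x, y) in letter:
--                 num += 1
--         enc.append(chr(48+num))
--     return ''.join(enc)
-- ===== SOURCE B (Python) =====
-- def encode_letter(letter):
--     # Input-driven: a single pass over the coordinates OR-ing each point's bit
--     # weight (16 >> y) into its column accumulator; no grid scan, no membership tests.
--     nums = [0, 0, 0, 0]
--     for (x, y) in letter:
--         if 0 <= x < 4 and 0 <= y < 5: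
--             nums[x] |= 16 >> y
--     return ''.join(chr(48 + n) for n in nums)
-- ===== Notes on version B (the rewrite author's own statement) =====
-- stated objective: alternative
-- what changed: A scans all 20 grid cells and does a membership test of the coordinate list at each cell, building each column value by shifting; B never scans the grid: it makes one pass over the input coordinates, bitwise-OR-ing each point's weight 16>>y into one of four column accumulators (OR makes duplicates harmless), then renders the four accumulators.
import Mathlib
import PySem

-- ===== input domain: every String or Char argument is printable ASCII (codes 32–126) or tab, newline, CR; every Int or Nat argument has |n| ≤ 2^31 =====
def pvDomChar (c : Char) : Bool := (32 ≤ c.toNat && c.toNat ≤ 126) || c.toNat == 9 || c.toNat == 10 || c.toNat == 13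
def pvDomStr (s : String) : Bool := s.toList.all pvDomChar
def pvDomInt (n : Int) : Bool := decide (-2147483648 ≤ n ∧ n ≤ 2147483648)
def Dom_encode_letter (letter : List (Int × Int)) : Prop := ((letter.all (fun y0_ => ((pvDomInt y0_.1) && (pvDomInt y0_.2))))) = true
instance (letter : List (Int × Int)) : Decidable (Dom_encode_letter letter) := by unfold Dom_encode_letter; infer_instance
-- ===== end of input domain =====

-- B replaces A's scan of all 20 grid cells (one membership test per cell) by a single pass
-- over the input coordinates, OR-ing each point's bit weight 16>>y into one of four column
-- accumulators (OR makes duplicates harmless); same output.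

-- ===== PORT A =====
def encode_letter (letter : List (Int × Int)) : String :=
  let enc : List Char :=
    (PySem.List.pyRange 0 4 1).foldl (fun enc x =>
      let num : Int :=
        (PySem.List.pyRange 0 5 1).foldl (fun num y =>
          let num := num <<< 1            -- num <<= 1
          if letter.contains (x, y) then num + 1 else num) 0
      enc ++ [Char.ofNat (48 + num).toNat]) []   -- chr(48+num); num ∈ [0,31]
  String.mk enc

-- ===== PORT B =====
-- one step of B's loop: nums[x] |= 16 >> y under the range guard
-- (16 >> y is computed in Nat and injected: exact since the guard gives 0 ≤ y)
def pvAcc (g : List Int) (c : Int × Int) : List Int :=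
  if 0 ≤ c.1 ∧ c.1 < 4 ∧ 0 ≤ c.2 ∧ c.2 < 5 then
    PySem.List.pySetD g c.1 (Int.lor (g.getD c.1.toNat 0) (Int.ofNat (16 >>> c.2.toNat)))
  else g

def encode_letter_alt (letter : List (Int × Int)) : String :=
  let nums := letter.foldl pvAcc [0, 0, 0, 0]
  String.mk (nums.map (fun n => Char.ofNat (48 + n).toNat))   -- chr(48+n)

-- ===== PRECONDITION & SPEC =====
def Spec_encode_letter (letter : List (Int × Int)) (out : String) : Prop := out = encode_letter_alt letter
instance (letter : List (Int × Int)) (out : String) : Decidable (Spec_encode_letter letter out) := by unfold Spec_encode_letter; infer_instance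

-- ===== CLAIM (what is proved, stated in full; the proofs are below) =====
def Claim_equal_encode_letter : Prop := ∀ (letter : List (Int × Int)), Dom_encode_letter letter → Spec_encode_letter letter (encode_letter letter)

-- ===== LEMMAS AND PROOFS =====

-- proof-level Nat mirror of B's per-column update
def pvColStep (x : Int) (v : Nat) (c : Int × Int) : Nat :=
  if 0 ≤ c.1 ∧ c.1 < 4 ∧ 0 ≤ c.2 ∧ c.2 < 5 ∧ c.1 = x then v ||| (16 >>> c.2.toNat) else v

-- the 5-bit column value as a function of the five membership booleans
def pvTgt (b0 b1 b2 b3 b4 : Bool) : Nat :=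
  (if b0 then 16 else 0) ||| (if b1 then 8 else 0) ||| (if b2 then 4 else 0)
    ||| (if b3 then 2 else 0) ||| (if b4 then 1 else 0)

theorem pvAcc_length (g : List Int) (c : Int × Int) : (pvAcc g c).length = g.length := by
  unfold pvAcc; split
  · next h => rw [PySem.List.pySetD_of_nonneg g _ (by omega)]; simp
  · rfl

theorem pv_foldl_length (l : List (Int × Int)) (g : List Int) :
    (l.foldl pvAcc g).length = g.length := by
  induction l generalizing g with
  | nil => rfl
  | cons c l ih => rw [List.foldl_cons, ih, pvAcc_length]

-- the fold over the input decomposes per column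
theorem pv_decompose (l : List (Int × Int)) (g : List Int) (hg : g.length = 4)
    (x : Int) (hx0 : 0 ≤ x) (hx : x < 4) (w : Nat) (hw : g.getD x.toNat 0 = Int.ofNat w) :
    (l.foldl pvAcc g).getD x.toNat 0 = Int.ofNat (l.foldl (pvColStep x) w) := by
  induction l generalizing g w with
  | nil => simpa using hw
  | cons c l ih =>
    rw [List.foldl_cons, List.foldl_cons]
    refine ih (pvAcc g c) (by rw [pvAcc_length, hg]) (pvColStep x w c) ?_
    unfold pvAcc pvColStep
    by_cases hv : 0 ≤ c.1 ∧ c.1 < 4 ∧ 0 ≤ c.2 ∧ c.2 < 5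
    · rw [if_pos hv]
      rw [PySem.List.pySetD_of_nonneg g _ (by omega)]
      by_cases hcx : c.1 = x
      · rw [if_pos ⟨hv.1, hv.2.1, hv.2.2.1, hv.2.2.2, hcx⟩]
        have hidx : c.1.toNat = x.toNat := by omega
        have hlt : x.toNat < g.length := by omega
        rw [hidx]
        simp only [List.getD, List.getElem?_set_self hlt, Option.getD_some]
        simp only [List.getD] at hw
        rw [hw]
        rfl
      · rw [if_neg (by tauto)]
        have hne : c.1.toNat ≠ x.toNat := by omega
        simp only [List.getD, List.getElem?_set_ne hne]
        simpa [List.getD] using hw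
    · rw [if_neg hv, if_neg (by tauto)]
      exact hw

-- the column fold from an arbitrary start is start OR fold-from-zero
theorem pv_or_init (x : Int) (l : List (Int × Int)) (v : Nat) :
    l.foldl (pvColStep x) v = v ||| l.foldl (pvColStep x) 0 := by
  induction l generalizing v with
  | nil => simp
  | cons c l ih =>
    rw [List.foldl_cons, List.foldl_cons, ih (pvColStep x v c), ih (pvColStep x 0 c)]
    unfold pvColStep; split
    · rw [Nat.lor_assoc]; simp
    · simp

-- the column value is determined by the five memberships
theorem pv_mask (x : Int) (hx0 : 0 ≤ x) (hx : x < 4) (l : List (Int × Int)) :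
    l.foldl (pvColStep x) 0
      = pvTgt (l.contains (x, 0)) (l.contains (x, 1)) (l.contains (x, 2))
              (l.contains (x, 3)) (l.contains (x, 4)) := by
  induction l with
  | nil => simp [pvTgt]
  | cons c l ih =>
    rw [List.foldl_cons, pv_or_init, ih]
    simp only [List.contains_cons]
    obtain ⟨cx, cy⟩ := c
    by_cases hv : 0 ≤ cx ∧ cx < 4 ∧ 0 ≤ cy ∧ cy < 5 ∧ cx = x
    · obtain ⟨h1, h2, h3, h4, rfl⟩ := hv
      have hbeq : ∀ (y : Int), (((cx, y) : Int × Int) == (cx, cy)) = (y == cy) := by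
        intro y
        by_cases h : y = cy
        · subst h; simp
        · rw [beq_eq_false_iff_ne.mpr (by simp [h]), beq_eq_false_iff_ne.mpr h]
      rw [hbeq 0, hbeq 1, hbeq 2, hbeq 3, hbeq 4]
      unfold pvColStep
      rw [if_pos ⟨h1, h2, h3, h4, rfl⟩]
      interval_cases cy <;>
        · simp only [show ((0:Int) == 0) = true from rfl, show ((0:Int) == 1) = false from rfl,
            show ((0:Int) == 2) = false from rfl, show ((0:Int) == 3) = false from rfl,
            show ((0:Int) == 4) = false from rfl, show ((1:Int) == 0) = false from rfl,
            show ((1:Int) == 1) = true from rfl, show ((1:Int) == 2) = false from rfl,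
            show ((1:Int) == 3) = false from rfl, show ((1:Int) == 4) = false from rfl,
            show ((2:Int) == 0) = false from rfl, show ((2:Int) == 1) = false from rfl,
            show ((2:Int) == 2) = true from rfl, show ((2:Int) == 3) = false from rfl,
            show ((2:Int) == 4) = false from rfl, show ((3:Int) == 0) = false from rfl,
            show ((3:Int) == 1) = false from rfl, show ((3:Int) == 2) = false from rfl,
            show ((3:Int) == 3) = true from rfl, show ((3:Int) == 4) = false from rfl,
            show ((4:Int) == 0) = false from rfl, show ((4:Int) == 1) = false from rfl,
            show ((4:Int) == 2) = false from rfl, show ((4:Int) == 3) = false from rfl,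
            show ((4:Int) == 4) = true from rfl, Bool.true_or, Bool.false_or]
          generalize l.contains ((cx : Int), (0 : Int)) = b0
          generalize l.contains ((cx : Int), (1 : Int)) = b1
          generalize l.contains ((cx : Int), (2 : Int)) = b2
          generalize l.contains ((cx : Int), (3 : Int)) = b3
          generalize l.contains ((cx : Int), (4 : Int)) = b4
          revert b0 b1 b2 b3 b4; decide
    · have hstep : pvColStep x 0 (cx, cy) = 0 := by
        unfold pvColStep; rw [if_neg (by tauto)]
      have hne : ∀ (y : Int), 0 ≤ y → y < 5 → (((x, y) : Int × Int) == (cx, cy)) = false := by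
        intro y hy0 hy
        rw [beq_eq_false_iff_ne]
        rintro h
        obtain ⟨rfl, rfl⟩ : x = cx ∧ y = cy := Prod.mk.injEq .. ▸ h
        exact hv ⟨hx0, hx, hy0, hy, rfl⟩
      rw [hne 0 (by norm_num) (by norm_num), hne 1 (by norm_num) (by norm_num),
        hne 2 (by norm_num) (by norm_num), hne 3 (by norm_num) (by norm_num),
        hne 4 (by norm_num) (by norm_num), hstep]
      simp

theorem pv_eq_four (l : List Int) (h : l.length = 4) :
    l = [l.getD 0 0, l.getD 1 0, l.getD 2 0, l.getD 3 0] := by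
  match l, h with
  | [a, b, c, d], _ => rfl

set_option maxHeartbeats 1000000 in
theorem encode_letter_spec : Claim_equal_encode_letter := by
  intro letter _
  show encode_letter letter = encode_letter_alt letter
  unfold encode_letter encode_letter_alt
  have hlen := pv_foldl_length letter [0, 0, 0, 0]
  have h0 := pv_decompose letter [0, 0, 0, 0] rfl 0 (by norm_num) (by norm_num) 0 rfl
  have h1 := pv_decompose letter [0, 0, 0, 0] rfl 1 (by norm_num) (by norm_num) 0 rfl
  have h2 := pv_decompose letter [0, 0, 0, 0] rfl 2 (by norm_num) (by norm_num) 0 rfl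
  have h3 := pv_decompose letter [0, 0, 0, 0] rfl 3 (by norm_num) (by norm_num) 0 rfl
  rw [pv_mask 0 (by norm_num) (by norm_num) letter] at h0
  rw [pv_mask 1 (by norm_num) (by norm_num) letter] at h1
  rw [pv_mask 2 (by norm_num) (by norm_num) letter] at h2
  rw [pv_mask 3 (by norm_num) (by norm_num) letter] at h3
  simp only [show ((0 : Int)).toNat = 0 from rfl, show ((1 : Int)).toNat = 1 from rfl,
    show ((2 : Int)).toNat = 2 from rfl, show ((3 : Int)).toNat = 3 from rfl] at h0 h1 h2 h3
  rw [pv_eq_four _ hlen, h0, h1, h2, h3]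
  simp only [show PySem.List.pyRange 0 4 1 = [0, 1, 2, 3] from by decide,
    show PySem.List.pyRange 0 5 1 = [0, 1, 2, 3, 4] from by decide,
    List.foldl_cons, List.foldl_nil, List.map_cons, List.map_nil, List.nil_append]
  refine congrArg String.mk ?_
  refine List.cons_eq_cons.mpr ⟨?_, List.cons_eq_cons.mpr ⟨?_, List.cons_eq_cons.mpr ⟨?_, List.cons_eq_cons.mpr ⟨?_, rfl⟩⟩⟩⟩
  ·
    generalize letter.contains ((0 : Int), (0 : Int)) = b0
    generalize letter.contains ((0 : Int), (1 : Int)) = b1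
    generalize letter.contains ((0 : Int), (2 : Int)) = b2
    generalize letter.contains ((0 : Int), (3 : Int)) = b3
    generalize letter.contains ((0 : Int), (4 : Int)) = b4
    revert b0 b1 b2 b3 b4
    decide
  ·
    generalize letter.contains ((1 : Int), (0 : Int)) = b0
    generalize letter.contains ((1 : Int), (1 : Int)) = b1
    generalize letter.contains ((1 : Int), (2 : Int)) = b2
    generalize letter.contains ((1 : Int), (3 : Int)) = b3
    generalize letter.contains ((1 : Int), (4 : Int)) = b4
    revert b0 b1 b2 b3 b4
    decide
  ·
    generalize letter.contains ((2 : Int), (0 : Int)) = b0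
    generalize letter.contains ((2 : Int), (1 : Int)) = b1
    generalize letter.contains ((2 : Int), (2 : Int)) = b2
    generalize letter.contains ((2 : Int), (3 : Int)) = b3
    generalize letter.contains ((2 : Int), (4 : Int)) = b4
    revert b0 b1 b2 b3 b4
    decide
  ·
    generalize letter.contains ((3 : Int), (0 : Int)) = b0
    generalize letter.contains ((3 : Int), (1 : Int)) = b1
    generalize letter.contains ((3 : Int), (2 : Int)) = b2
    generalize letter.contains ((3 : Int), (3 : Int)) = b3
    generalize letter.contains ((3 : Int), (4 : Int)) = b4
    revert b0 b1 b2 b3 b4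
    decide

-- ===== VERDICT: encode_letter_spec above proves Claim_equal_encode_letter =====
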